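-- pv_equiv track=rewrite | github.com/BadWolf1023/MKW-Table-Bot | MogiUpdate.py | line_is_valid_player
-- ===== SOURCE A (Python) =====
-- valid_score_chars = set("+-|0123456789")
--
-- hex_code_chars = set("abcdef0123456789")
--
-- def ends_with_hex_code(line:str):
--     temp = line.lower().strip()
--     if len(temp) < 7:
--         return False
--     return temp[-1] in hex_code_chars and temp[-2] in hex_code_chars and temp[-3] in hex_code_chars\
--         and temp[-4] in hex_code_chars and temp[-5] in hex_code_chars and temp[-6] in hex_code_chars\
--         and temp[-7] == '#'
--
-- def line_is_valid_player(line:str):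
--     if len(line) == 0:
--         return False
--     if ends_with_hex_code(line):
--         return False
--     if line[-1] not in valid_score_chars:
--         return False
--     for char in line[::-1]:
--         if char in valid_score_chars:
--             continue
--         return char == " " #examine what I did closely. No, this isn't a mistake
--     return False
-- ===== SOURCE B (Python) =====
-- valid_score_chars = set("+-|0123456789")
--
-- hex_code_chars = set("abcdef0123456789")
--
-- def ends_with_hex_code(line:str):
--     temp = line.lower().strip()
--     if len(temp) < 7:
--         return False
--     return temp[-1] in hex_code_chars and temp[-2] in hex_code_chars and temp[-3] in hex_code_chars\
--         and temp[-4] in hex_code_chars and temp[-5] in hex_code_chars and temp[-6] in hex_code_chars\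
--         and temp[-7] == '#'
--
-- def line_is_valid_player(line:str):
--     if len(line) == 0:
--         return False
--     if ends_with_hex_code(line):
--         return False
--     idx = line.rfind(" ")
--     if idx == -1 or idx == len(line) - 1:
--         return False
--     return all(c in valid_score_chars for c in line[idx+1:])
-- ===== Notes on version B (the rewrite author's own statement) =====
-- stated objective: alternative
-- what changed: A scans the line character by character in reverse with early return; B instead locates the last space with str.rfind and validates the suffix token after it with one forward all() pass over score characters.
import Mathlib
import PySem

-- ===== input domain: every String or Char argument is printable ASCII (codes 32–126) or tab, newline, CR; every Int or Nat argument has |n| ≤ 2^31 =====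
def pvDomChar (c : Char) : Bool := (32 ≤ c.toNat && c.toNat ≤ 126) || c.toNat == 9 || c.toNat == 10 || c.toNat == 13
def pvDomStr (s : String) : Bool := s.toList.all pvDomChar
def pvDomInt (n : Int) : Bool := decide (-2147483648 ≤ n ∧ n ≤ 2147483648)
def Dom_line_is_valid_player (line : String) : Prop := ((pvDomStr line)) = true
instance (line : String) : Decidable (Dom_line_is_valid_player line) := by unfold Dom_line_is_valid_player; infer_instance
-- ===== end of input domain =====

-- B replaces A's reverse character-by-character scan by locating the LAST SPACE with
-- rfind and then validating the suffix token after it in one forward all() pass;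
-- objective: simpler decomposition. Both ports share the unchanged ends_with_hex_code helper.

-- ===== PORT A =====
def pvScoreChars : List Char := "+-|0123456789".toList
def pvHexChars : List Char := "abcdef0123456789".toList

-- temp[i] ∈ hex_code_chars (index always in range under the len ≥ 7 guard)
def pvHexAt (temp : List Char) (i : Int) : Bool :=
  match PySem.List.pyGet? temp i with
  | some c => pvHexChars.contains c
  | none => false

def endsWithHexCode (line : String) : Bool :=
  let temp := PySem.Chars.strip (PySem.Chars.lower line.toList)
  if temp.length < 7 then false
  else
    pvHexAt temp (-1) && pvHexAt temp (-2) && pvHexAt temp (-3) &&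
    pvHexAt temp (-4) && pvHexAt temp (-5) && pvHexAt temp (-6) &&
    (match PySem.List.pyGet? temp (-7) with
     | some c => c == '#'
     | none => false)

-- A's 'for char in line[::-1]' loop body
def lineScanA : List Char → Bool
  | [] => false
  | c :: rest => if pvScoreChars.contains c then lineScanA rest else c == ' '

def line_is_valid_player (line : String) : Bool :=
  let cs := line.toList
  if cs.length = 0 then false
  else if endsWithHexCode line then false
  else
    match PySem.List.pyGet? cs (-1) with
    | none => false
    | some c =>
      if !(pvScoreChars.contains c) then false
      else
        match PySem.List.slice? cs none none (-1) with
        | some r => lineScanA r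
        | none => false

-- ===== PORT B =====
-- Source B: idx = line.rfind(" "); guard idx == -1 or idx == len(line)-1;
--       then all(c in valid_score_chars for c in line[idx+1:])
def line_is_valid_player_alt (line : String) : Bool :=
  let cs := line.toList
  if cs.length = 0 then false
  else if endsWithHexCode line then false
  else
    let idx := PySem.Chars.rfind cs [' ']
    if idx = -1 ∨ idx = (cs.length : Int) - 1 then false
    else (PySem.List.slice cs (some (idx + 1)) none).all (pvScoreChars.contains ·)

-- ===== PRECONDITION & SPEC =====
def Spec_line_is_valid_player (line : String) (out : Bool) : Prop := out = line_is_valid_player_alt line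
instance (line : String) (out : Bool) : Decidable (Spec_line_is_valid_player line out) := by unfold Spec_line_is_valid_player; infer_instance

-- ===== CLAIM (what is proved, stated in full; the proofs are below) =====
def Claim_equal_line_is_valid_player : Prop := ∀ (line : String), Dom_line_is_valid_player line → Spec_line_is_valid_player line (line_is_valid_player line)

-- ===== LEMMAS AND PROOFS =====

-- the shared characterisation: some position k carries a space, the suffix after it is
-- nonempty and consists of score characters only
def pvQ (cs : List Char) : Prop :=
  ∃ k : Nat, k + 1 < cs.length ∧ cs[k]? = some ' ' ∧ ∀ c ∈ cs.drop (k + 1), c ∈ pvScoreChars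

lemma pvPyGet_neg_one {α : Type} (cs : List α) (h : cs ≠ []) :
    PySem.List.pyGet? cs (-1) = cs.reverse.head? := by
  have hn : 1 ≤ cs.length := List.length_pos_iff.mpr h
  simp [PySem.List.pyGet?, PySem.List.pyIdx?, show -(cs.length : Int) ≤ -1 by omega,
        List.head?_reverse, List.getLast?_eq_getElem?]

lemma pvIsPrefixOf_single (c : Char) (s : List Char) :
    [c].isPrefixOf s = true ↔ s[0]? = some c := by
  rw [List.isPrefixOf_iff_prefix]
  cases s with
  | nil => simp
  | cons a t => simp [List.cons_prefix_iff, eq_comm]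

lemma pvGo_spec (s : List Char) (c : Char) (j : Nat) :
    (PySem.Chars.rfind.go s [c] j = -1 ∧ ∀ i : Nat, i ≤ j → s[i]? ≠ some c) ∨
    (∃ k : Nat, k ≤ j ∧ PySem.Chars.rfind.go s [c] j = (k : Int) ∧ s[k]? = some c ∧
       ∀ i : Nat, k < i → i ≤ j → s[i]? ≠ some c) := by
  induction j with
  | zero =>
    have h0 : PySem.Chars.rfind.go s [c] 0 = if [c].isPrefixOf s then 0 else -1 := rfl
    by_cases h : s[0]? = some c
    · right
      refine ⟨0, le_refl _, ?_, h, by omega⟩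
      rw [h0, if_pos ((pvIsPrefixOf_single c s).mpr h)]
      simp
    · left
      refine ⟨?_, ?_⟩
      · rw [h0, if_neg (fun hp => h ((pvIsPrefixOf_single c s).mp hp))]
      · intro i hi; interval_cases i; exact h
  | succ j ih =>
    have hs : PySem.Chars.rfind.go s [c] (j+1)
        = if [c].isPrefixOf (s.drop (j+1)) then ((j : Int)+1) else PySem.Chars.rfind.go s [c] j := rfl
    by_cases h : s[j+1]? = some c
    · right
      refine ⟨j+1, le_refl _, ?_, h, fun i h1 h2 => ((by omega : False)).elim⟩
      rw [hs, if_pos]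
      · omega
      · exact (pvIsPrefixOf_single c _).mpr (by simpa using h)
    · have hneg : [c].isPrefixOf (s.drop (j+1)) = false := by
        rw [Bool.eq_false_iff]
        intro hp
        exact h (by simpa using (pvIsPrefixOf_single c _).mp hp)
      rw [hs, hneg] at *
      rcases ih with ⟨h1, h2⟩ | ⟨k, hk, h1, h2, h3⟩
      · left
        refine ⟨by simpa using h1, fun i hi => ?_⟩
        rcases Nat.lt_succ_iff_lt_or_eq.mp (Nat.lt_succ_of_le hi) with hlt | heq
        · exact h2 i (by omega)
        · subst heq; exact h
      · right
        refine ⟨k, by omega, by simpa using h1, h2, fun i hik hij => ?_⟩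
        rcases Nat.lt_succ_iff_lt_or_eq.mp (Nat.lt_succ_of_le hij) with hlt | heq
        · exact h3 i hik (by omega)
        · subst heq; exact h

lemma pvSpace_not_score : (' ' ∈ pvScoreChars) = False := by simp [pvScoreChars]

-- rfind cs [' '] under pvQ: the witness k is the unique last space
lemma pvRfind_of_Q (cs : List Char) (k : Nat) (hk : k + 1 < cs.length)
    (hsp : cs[k]? = some ' ') (hall : ∀ c ∈ cs.drop (k + 1), c ∈ pvScoreChars) :
    PySem.Chars.rfind cs [' '] = (k : Int) := by
  have hgo := pvGo_spec cs ' ' cs.length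
  have hnotafter : ∀ i : Nat, k < i → cs[i]? ≠ some ' ' := by
    intro i hik hi
    by_cases hlen : i < cs.length
    · have hmem : ' ' ∈ cs.drop (k + 1) := by
        have : (cs.drop (k+1))[i - (k+1)]? = some ' ' := by
          rw [List.getElem?_drop]
          simpa [show k + 1 + (i - (k+1)) = i by omega] using hi
        exact List.mem_of_getElem? this
      exact (pvSpace_not_score ▸ hall ' ' hmem)
    · rw [List.getElem?_eq_none (by omega)] at hi; simp at hi
  rcases hgo with ⟨_, h2⟩ | ⟨k', hk', h1, h2, h3⟩
  · exact absurd hsp (h2 k (by omega))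
  · have : k' = k := by
      rcases Nat.lt_trichotomy k' k with h | h | h
      · exact absurd hsp (h3 k h (by omega))
      · exact h
      · exact absurd h2 (hnotafter k' h)
    subst this
    simpa [PySem.Chars.rfind] using h1

lemma pvScanA_iff (l : List Char) :
    lineScanA l = true ↔ (l.dropWhile (pvScoreChars.contains ·)).head? = some ' ' := by
  induction l with
  | nil => simp [lineScanA]
  | cons c t ih =>
    by_cases hc : c ∈ pvScoreChars
    · have hcb : (pvScoreChars.contains c) = true := by simpa using hc
      rw [List.dropWhile_cons, if_pos hcb]
      simpa [lineScanA, hc] using ih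
    · have hcb : (pvScoreChars.contains c) = false := by simpa using hc
      rw [List.dropWhile_cons, if_neg (by simpa using hc)]
      simp only [lineScanA, hcb, Bool.false_eq_true, if_false, List.head?_cons,
        Option.some_inj, beq_iff_eq]

lemma pvDropWhile_append_cons (p : Char → Bool) (t : List Char) (c : Char) (r : List Char)
    (h : ∀ x ∈ t, p x = true) (hc : p c = false) :
    (t ++ c :: r).dropWhile p = c :: r := by
  induction t with
  | nil => simp [List.dropWhile_cons, hc]
  | cons a u ih =>
    have ha : p a = true := h a (by simp)
    simp only [List.cons_append, List.dropWhile_cons, ha, if_true]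
    exact ih (fun x hx => h x (by simp [hx]))

-- A's core (after the shared guards) holds exactly on pvQ
lemma pvCoreA_iff (cs : List Char) (hne : cs ≠ []) :
    (match PySem.List.pyGet? cs (-1) with
     | none => false
     | some c =>
       if !(pvScoreChars.contains c) then false
       else
         match PySem.List.slice? cs none none (-1) with
         | some r => lineScanA r
         | none => false) = true ↔ pvQ cs := by
  rw [pvPyGet_neg_one cs hne, PySem.List.slice?_none_none_neg_one]
  constructor
  · intro h
    rcases hh : cs.reverse.head? with _ | c
    · rw [hh] at h; exact absurd h (by simp)
    · rw [hh] at h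
      by_cases hc : c ∈ pvScoreChars
      · simp only [hc, List.contains_eq_mem, decide_true, Bool.not_true, Bool.false_eq_true,
          if_false] at h
        have hscan := (pvScanA_iff cs.reverse).mp (by simpa [hc] using h)
        -- decompose: reverse = takeWhile ++ ' ' :: r
        set t := cs.reverse.takeWhile (pvScoreChars.contains ·) with ht
        rcases hd : cs.reverse.dropWhile (pvScoreChars.contains ·) with _ | ⟨d, r⟩
        · rw [hd] at hscan; exact absurd hscan (by simp)
        · rw [hd] at hscan
          have hdsp : d = ' ' := by simpa using hscan
          have hrev : cs.reverse = t ++ ' ' :: r := by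
            rw [ht, ← hdsp, ← hd, List.takeWhile_append_dropWhile]
          have htne : t ≠ [] := by
            intro h0
            have : cs.reverse.head? = some ' ' := by rw [hrev, h0]; simp
            rw [hh] at this
            have : c = ' ' := by simpa using this
            exact (pvSpace_not_score ▸ (this ▸ hc))
          have hcs : cs = r.reverse ++ ' ' :: t.reverse := by
            have := congrArg List.reverse hrev
            simpa using this
          refine ⟨r.reverse.length, ?_, ?_, ?_⟩
          · rw [hcs]; simp [List.length_append]
            have := List.length_pos_iff.mpr htne
            omega
          · rw [hcs, List.getElem?_append_right (by omega)]
            simp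
          · intro x hx
            rw [hcs, show r.reverse.length + 1 = r.reverse.length + 1 from rfl,
                List.drop_length_add_append] at hx
            simp only [List.drop_one, List.tail_cons] at hx
            have hxrev : x ∈ t := by simpa using hx
            have := List.mem_takeWhile_imp (ht ▸ hxrev)
            simpa using this
      · rw [hh] at *
        simp [hc] at h
  · rintro ⟨k, hk, hsp, hall⟩
    have hdec : cs = cs.take (k+1) ++ cs.drop (k+1) := (List.take_append_drop _ _).symm
    have hkl : k < cs.length := by omega
    have htk : cs.take (k+1) = cs.take k ++ [' '] := by
      rw [List.take_succ]
      congr 1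
      have := hsp
      rw [List.getElem?_eq_getElem hkl] at this
      simp only [Option.some_inj] at this
      simp [List.getElem?_eq_getElem hkl, this]
    set suf := cs.drop (k+1) with hsuf
    have hsufne : suf ≠ [] := by
      rw [hsuf]
      intro h0
      have := congrArg List.length h0
      simp at this
      omega
    have hrev : cs.reverse = suf.reverse ++ ' ' :: (cs.take k).reverse := by
      conv_lhs => rw [hdec, htk]
      simp
    have hallrev : ∀ x ∈ suf.reverse, (pvScoreChars.contains x) = true := by
      intro x hx
      simpa using hall x (by simpa using hx)
    have hdw : cs.reverse.dropWhile (pvScoreChars.contains ·) = ' ' :: (cs.take k).reverse := by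
      rw [hrev]
      exact pvDropWhile_append_cons _ _ _ _ hallrev (by simp [pvScoreChars])
    have hhd : ∃ c0, cs.reverse.head? = some c0 ∧ c0 ∈ pvScoreChars := by
      rcases hs0 : suf.reverse with _ | ⟨c0, t0⟩
      · exact absurd (by simpa using hs0) hsufne
      · refine ⟨c0, ?_, ?_⟩
        · rw [hrev, hs0]; simp
        · have : c0 ∈ suf.reverse := by rw [hs0]; simp
          simpa using hallrev c0 this
    rcases hhd with ⟨c0, hc0, hc0s⟩
    rw [hc0]
    simp only [hc0s, List.contains_eq_mem, decide_true, Bool.not_true, Bool.false_eq_true, if_false]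
    simp only [List.contains_eq_mem] at hc0s ⊢
    rw [pvScanA_iff, hdw]
    simp

-- B's core (after the shared guards) holds exactly on pvQ
lemma pvCoreB_iff (cs : List Char) :
    (if PySem.Chars.rfind cs [' '] = -1 ∨ PySem.Chars.rfind cs [' '] = (cs.length : Int) - 1
     then false
     else (PySem.List.slice cs (some (PySem.Chars.rfind cs [' '] + 1)) none).all
            (pvScoreChars.contains ·)) = true ↔ pvQ cs := by
  constructor
  · intro h
    by_cases hif : (PySem.Chars.rfind cs [' '] = -1 ∨ PySem.Chars.rfind cs [' '] = (cs.length : Int) - 1)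
    · rw [if_pos hif] at h; exact absurd h (by simp)
    · rw [if_neg hif] at h
      push_neg at hif
      rcases hif with ⟨h1, h2⟩
      rcases pvGo_spec cs ' ' cs.length with ⟨hg, _⟩ | ⟨k, hkle, hg, hsp, _⟩
      · exact absurd (by rw [PySem.Chars.rfind, hg]) h1
      · have hrf : PySem.Chars.rfind cs [' '] = (k : Int) := by rw [PySem.Chars.rfind, hg]
        have hklt : k < cs.length := by
          by_contra hc
          rw [List.getElem?_eq_none (by omega)] at hsp
          simp at hsp
        have hkne : k ≠ cs.length - 1 := by
          intro heq
          apply h2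
          rw [hrf, heq]
          omega
        refine ⟨k, by omega, hsp, ?_⟩
        intro c hc
        rw [hrf, show (k : Int) + 1 = ((k+1 : Nat) : Int) by push_cast; ring,
            PySem.List.slice_from_natCast] at h
        rw [List.all_eq_true] at h
        simpa using h c hc
  · rintro ⟨k, hk, hsp, hall⟩
    have hrf := pvRfind_of_Q cs k hk hsp hall
    rw [hrf]
    have hif : ¬ ((k : Int) = -1 ∨ (k : Int) = (cs.length : Int) - 1) := by
      push_neg
      constructor <;> omega
    rw [if_neg hif, show (k : Int) + 1 = ((k+1 : Nat) : Int) by push_cast; ring,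
        PySem.List.slice_from_natCast, List.all_eq_true]
    intro c hc
    simpa using hall c hc

-- ===== VERDICT (by name: the statement is the Claim_ definition above) =====
theorem line_is_valid_player_spec : Claim_equal_line_is_valid_player := by
  intro line _
  unfold Spec_line_is_valid_player line_is_valid_player line_is_valid_player_alt
  by_cases h0 : line.toList.length = 0
  · simp [h0]
  · have hne : line.toList ≠ [] := by
      intro h; exact h0 (by simp [h])
    simp only [h0, if_false]
    by_cases hhex : endsWithHexCode line = true
    · simp [hhex]
    · simp only [hhex, Bool.false_eq_true, if_false]
      rw [Bool.eq_iff_iff, pvCoreA_iff line.toList hne]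
      exact (pvCoreB_iff line.toList).symm
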